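/- GENERATED by tools/from_farm_form.py from farm.toyh/worked/prog_main/Proof.lean (a worked proof of the farm's unit `prog_main`,
   accepted by the verdict) — do not edit. -/
import Toyh.Spec.Units.prog_main
import Toyh.Spec.Proved.prog_main_Lemmas

/-!
  `prog_main` of the heap toy (0x105000, 28 instructions; c/toyh/toyh.c:31–54) satisfies its contract: a client of the heap, from the
  contracts of `clamp_length`, `malloc`, `memcpy` and `free`. The walk is cut at every returned callee state
  (Toyh/Spec/Proved/prog_main_Lemmas.lean, part 2); this file chains the five pieces:

      entry ─ th_seg_entry_w ─ ret1 ─ th_seg_ret1_w ─ ret2 ─ th_seg_ret2_w ─┬─ ret3 ─ th_seg_ret3_w ─┬─ ret4 ─ th_seg_ret4_w ─ ret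
                                                                             └─ (malloc returned NULL) ┘
-/

open X86 X86.User Asan ProgX.Base Toyh.Spec

/-- `prog_main` satisfies its contract: `runs++`, `n = clamp_length(len)`, `p = malloc(n)`; NULL returns 0 with the heap as it was;
otherwise `memcpy(p, in, n)` into the new live object, `free(p)`, and `n` is returned with the new object freed. -/
theorem Toyh.Spec.Proved.prog_main_ok : Toyh.Spec.prog_main.Statement := by
  intro Lay hLay μ hμ u₀ hcode h_cl h_malloc h_memcpy h_free H rest frames u ret he hpre
  -- the contracts of the two callees that are entered with the heap `H` itself
  have hcl := h_cl (H.liveObjs ++ rest) frames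
  have hmalloc := h_malloc H rest frames
  -- 0x105000: the pushes, `runs++`, `clamp_length`
  refine (Toyh.Spec.Proved.prog_main.th_seg_entry_w Lay hLay μ hμ u₀ hcode H rest frames u ret hcl he hpre).trans ?_
  intro v1 hv1
  -- ret1: `malloc`
  refine (Toyh.Spec.Proved.prog_main.th_seg_ret1_w Lay hLay μ hμ u₀ hcode H rest frames u ret hmalloc he hpre v1 hv1).trans ?_
  intro v2 hv2
  -- ret2: `if (p == NULL)`, `memcpy`
  refine (Toyh.Spec.Proved.prog_main.th_seg_ret2_w Lay hLay μ hμ u₀ hcode H rest frames u ret h_memcpy he hpre v2 hv2).trans ?_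
  intro v3 hv3
  rcases hv3 with hret3 | hret4
  · -- ret3: `free`, then the epilogue
    refine (Toyh.Spec.Proved.prog_main.th_seg_ret3_w Lay hLay μ hμ u₀ hcode H rest frames u ret h_free he hpre v3 hret3).trans ?_
    intro v4 hv4
    exact Toyh.Spec.Proved.prog_main.th_seg_ret4_w Lay hLay μ hμ u₀ hcode H rest frames u ret he hpre v4 hv4
  · -- ret4 at once: `malloc` returned NULL
    exact Toyh.Spec.Proved.prog_main.th_seg_ret4_w Lay hLay μ hμ u₀ hcode H rest frames u ret he hpre v3 hret4
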